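-- pv_equiv track=rewrite | github.com/ujjwaldotverma/DSA-Bootcamp | 03.Strings/06.SplitBinaryStringIntoSubstringsWithEqual0sAnd1s.py | function
-- ===== SOURCE A (Python) =====
-- def function(string):
--     count0=0
--     count1=0
--     result=0
--     for i in range(len(string)):
--         if string[i]=="0":
--             count0 += 1
--         else:
--             count1 += 1
--         if count0 == count1:
--             result += 1
--     if count0 != count1:
--         return -1
--     return result
-- ===== SOURCE B (Python) =====
-- def function(string):
--     # Greedy chunk decomposition: repeatedly strip the shortest balanced
--     # prefix; the answer is the number of chunks, or -1 if a remainder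
--     # has no balanced prefix.
--     result = 0
--     rest = string
--     while rest:
--         balance = 0
--         tail = None
--         for i, c in enumerate(rest):
--             balance += 1 if c == "0" else -1
--             if balance == 0:
--                 tail = rest[i + 1:]
--                 break
--         if tail is None:
--             return -1
--         result += 1
--         rest = tail
--     return result
-- ===== Notes on version B (the rewrite author's own statement) =====
-- stated objective: alternative
-- what changed: Replaces A's single counting loop (two counters with an in-loop result increment) by a greedy chunk decomposition: repeatedly strip the shortest balanced prefix, counting chunks, and return -1 when a nonempty remainder has no balanced prefix.
import Mathlib
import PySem

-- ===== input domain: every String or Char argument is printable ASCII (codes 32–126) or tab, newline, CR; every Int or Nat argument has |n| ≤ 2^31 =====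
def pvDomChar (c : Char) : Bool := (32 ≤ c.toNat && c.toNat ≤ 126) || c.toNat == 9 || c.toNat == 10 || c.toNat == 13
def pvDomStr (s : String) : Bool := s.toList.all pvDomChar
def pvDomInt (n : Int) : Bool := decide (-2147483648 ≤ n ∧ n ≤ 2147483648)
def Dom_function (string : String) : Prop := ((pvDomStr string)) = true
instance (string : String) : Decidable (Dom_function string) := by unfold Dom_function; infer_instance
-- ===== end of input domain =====

-- B replaces A's single counting loop by greedy chunk decomposition: repeatedly strip the shortest balanced prefix and count chunks; same cost, different algorithm shape.

-- ===== PORT A =====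
-- loop state: (count0, count1, result)
def functionLoop (l : List Char) (st : Int × Int × Int) : Int × Int × Int :=
  match l with
  | [] => st
  | c :: cs =>
      let st1 : Int × Int × Int :=
        if c = '0' then (st.1 + 1, st.2.1, st.2.2) else (st.1, st.2.1 + 1, st.2.2)
      let st2 : Int × Int × Int :=
        if st1.1 = st1.2.1 then (st1.1, st1.2.1, st1.2.2 + 1) else st1
      functionLoop cs st2

def function (string : String) : Int :=
  let st := functionLoop string.toList (0, 0, 0)
  if st.1 ≠ st.2.1 then -1 else st.2.2

-- ===== PORT B =====
-- B's inner for-loop: walk keeping the running balance; at the first index where it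
-- hits zero return the remaining suffix (string[i+1:]); none if it never does.
def splitFirst (l : List Char) (bal : Int) : Option (List Char) :=
  match l with
  | [] => none
  | c :: cs =>
      let b := bal + (if c = '0' then 1 else -1)
      if b = 0 then some cs else splitFirst cs b

theorem splitFirst_length : ∀ (l : List Char) (b : Int) (rest : List Char),
    splitFirst l b = some rest → rest.length < l.length := by
  intro l
  induction l with
  | nil => intro b rest h; simp [splitFirst] at h
  | cons c cs ih =>
      intro b rest h
      simp only [splitFirst] at h
      by_cases hb : b + (if c = '0' then 1 else -1) = 0
      · rw [if_pos hb] at h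
        cases h; simp
      · rw [if_neg hb] at h
        exact Nat.lt_trans (ih _ rest h) (by simp)

-- B's outer while-loop: strip the shortest balanced prefix, count chunks in result
def functionAltLoop (l : List Char) (result : Int) : Int :=
  match l with
  | [] => result
  | c :: cs =>
      match h : splitFirst (c :: cs) 0 with
      | none => -1
      | some rest => functionAltLoop rest (result + 1)
termination_by l.length
decreasing_by exact splitFirst_length _ _ _ h

def function_alt (string : String) : Int := functionAltLoop string.toList 0

-- ===== PRECONDITION & SPEC =====
def Spec_function (string : String) (out : Int) : Prop := out = function_alt string
instance (string : String) (out : Int) : Decidable (Spec_function string out) := by unfold Spec_function; infer_instance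

-- ===== CLAIM (what is proved, stated in full; the proofs are below) =====
def Claim_equal_function : Prop := ∀ (string : String), Dom_function string → Spec_function string (function string)

-- ===== LEMMAS AND PROOFS =====

-- running prefix balances starting from b (proof-only helper)
def functionAccum (l : List Char) (b : Int) : List Int :=
  match l with
  | [] => []
  | c :: cs =>
      let b' := b + (if c = '0' then 1 else -1)
      b' :: functionAccum cs b'

-- A's loop computes the last prefix balance (count0-count1) and the number of zero balances
theorem functionLoop_accum (l : List Char) (c0 c1 r : Int) :
    (functionLoop l (c0, c1, r)).1 - (functionLoop l (c0, c1, r)).2.1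
        = (functionAccum l (c0 - c1)).getLastD (c0 - c1)
    ∧ (functionLoop l (c0, c1, r)).2.2
        = r + ((functionAccum l (c0 - c1)).count 0 : Int) := by
  induction l generalizing c0 c1 r with
  | nil => simp [functionLoop, functionAccum]
  | cons c cs ih =>
      by_cases h0 : c = '0'
      · simp only [functionLoop, functionAccum, if_pos h0]
        have e : c0 + 1 - c1 = c0 - c1 + 1 := by ring
        by_cases he : c0 + 1 = c1
        · simp only [if_pos he]
          obtain ⟨ha, hb⟩ := ih (c0 + 1) c1 (r + 1)
          have hz : c0 - c1 + 1 = 0 := by omega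
          refine ⟨?_, ?_⟩
          · rw [ha, e, List.getLastD_cons]
          · rw [hb, e, hz]
            simp
            omega
        · simp only [if_neg he]
          obtain ⟨ha, hb⟩ := ih (c0 + 1) c1 r
          have hz : ¬ (c0 - c1 + 1 = 0) := by omega
          refine ⟨?_, ?_⟩
          · rw [ha, e, List.getLastD_cons]
          · rw [hb, e]
            simp [hz]
      · simp only [functionLoop, functionAccum, if_neg h0]
        have e : c0 - (c1 + 1) = c0 - c1 + -1 := by ring
        by_cases he : c0 = c1 + 1
        · simp only [if_pos he]
          obtain ⟨ha, hb⟩ := ih c0 (c1 + 1) (r + 1)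
          have hz : c0 - c1 + -1 = 0 := by omega
          refine ⟨?_, ?_⟩
          · rw [ha, e, List.getLastD_cons]
          · rw [hb, e, hz]
            simp
            omega
        · simp only [if_neg he]
          obtain ⟨ha, hb⟩ := ih c0 (c1 + 1) r
          have hz : ¬ (c0 - c1 + -1 = 0) := by omega
          refine ⟨?_, ?_⟩
          · rw [ha, e, List.getLastD_cons]
          · rw [hb, e]
            simp [hz]

theorem splitFirst_none_accum : ∀ (l : List Char) (b : Int),
    splitFirst l b = none → (functionAccum l b).count 0 = 0 := by
  intro l
  induction l with
  | nil => intro b _; simp [functionAccum]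
  | cons c cs ih =>
      intro b h
      simp only [splitFirst] at h
      by_cases hb : b + (if c = '0' then 1 else -1) = 0
      · rw [if_pos hb] at h; exact absurd h (by simp)
      · rw [if_neg hb] at h
        simp [functionAccum, hb, ih _ h]

theorem accum_ne_nil (c : Char) (cs : List Char) (b : Int) :
    functionAccum (c :: cs) b ≠ [] := by
  simp [functionAccum]

theorem splitFirst_some_accum : ∀ (l : List Char) (b : Int) (rest : List Char),
    splitFirst l b = some rest →
    ((functionAccum l b).count 0 = 1 + (functionAccum rest 0).count 0
     ∧ (functionAccum l b).getLastD b = (functionAccum rest 0).getLastD 0) := by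
  intro l
  induction l with
  | nil => intro b rest h; simp [splitFirst] at h
  | cons c cs ih =>
      intro b rest h
      simp only [splitFirst] at h
      by_cases hb : b + (if c = '0' then 1 else -1) = 0
      · rw [if_pos hb] at h
        cases h
        constructor
        · simp [functionAccum, hb]
          omega
        · simp only [functionAccum, List.getLastD_cons, hb]
      · rw [if_neg hb] at h
        obtain ⟨h1, h2⟩ := ih _ rest h
        constructor
        · simp only [functionAccum, List.count_cons, h1]
          simp [hb]
        · simp only [functionAccum, List.getLastD_cons, h2]

-- B's loop equals A's characterization: -1 if final balance nonzero, else result + #zeros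
theorem altLoop_char : ∀ (n : Nat) (l : List Char) (result : Int), l.length ≤ n →
    functionAltLoop l result =
      (if (functionAccum l 0).getLastD 0 ≠ 0 then -1
       else result + ((functionAccum l 0).count 0 : Int)) := by
  intro n
  induction n with
  | zero =>
      intro l result hl
      have : l = [] := List.length_eq_zero_iff.mp (Nat.le_zero.mp hl)
      subst this
      simp [functionAltLoop, functionAccum]
  | succ n ih =>
      intro l result hl
      cases l with
      | nil => simp [functionAltLoop, functionAccum]
      | cons c cs =>
          rw [functionAltLoop]
          split
          · next hs =>
              have hcnt := splitFirst_none_accum _ _ hs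
              have hne : (functionAccum (c :: cs) 0).getLastD 0 ≠ 0 := by
                have hmem : (functionAccum (c :: cs) 0).getLastD 0 ∈ functionAccum (c :: cs) 0 := by
                  cases ha : functionAccum (c :: cs) 0 with
                  | nil => exact absurd ha (accum_ne_nil c cs 0)
                  | cons x xs =>
                      rw [List.getLastD_cons]
                      exact List.getLastD_mem_cons
                intro h0
                rw [h0] at hmem
                have := List.count_pos_iff.mpr hmem
                omega
              rw [if_pos hne]
          · next rest hs =>
              obtain ⟨h1, h2⟩ := splitFirst_some_accum _ _ _ hs
              have hrest : rest.length ≤ n := by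
                have := splitFirst_length _ _ _ hs
                simp only [List.length_cons] at this hl
                omega
              rw [ih rest (result + 1) hrest]
              by_cases hz : (functionAccum rest 0).getLastD 0 = 0
              · have hll : (functionAccum (c :: cs) 0).getLastD 0 = 0 := h2.trans hz
                simp only [hz, ne_eq, not_true_eq_false, if_false, hll, h1]
                push_cast
                ring
              · have hll : (functionAccum (c :: cs) 0).getLastD 0 ≠ 0 := by rw [h2]; exact hz
                simp only [ne_eq, hz, not_false_eq_true, if_true, hll]

-- ===== VERDICT (by name: the statement is the Claim_ definition above) =====
theorem function_spec : Claim_equal_function := by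
  intro s _
  unfold Spec_function function function_alt
  obtain ⟨ha, hb⟩ := functionLoop_accum s.toList 0 0 0
  rw [altLoop_char s.toList.length s.toList 0 le_rfl]
  simp only [show (0:Int) - 0 = 0 from rfl] at ha hb
  by_cases hz : (functionAccum s.toList 0).getLastD 0 = 0
  · have heq : (functionLoop s.toList (0,0,0)).1 = (functionLoop s.toList (0,0,0)).2.1 := by omega
    simp only [heq, ne_eq, not_true_eq_false, if_false, hz, hb]
  · have hne : (functionLoop s.toList (0,0,0)).1 ≠ (functionLoop s.toList (0,0,0)).2.1 := by
      intro hh; exact hz (by omega)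
    simp only [ne_eq, hne, not_false_eq_true, if_true, hz]
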